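-- pv_equiv track=rewrite | github.com/AndrewStoddard/cs3280project2 | cs3280project2.py | get_binary_for_8_bits
-- ===== SOURCE A (Python) =====
-- def get_binary_for_8_bits(number_of_active_bits):
--     binary = "0b"
--     for i in range(0, 8):
--         if (i < number_of_active_bits):
--             binary += '1'
--         else:
--             binary += '0'
--     return binary
-- ===== SOURCE B (Python) =====
-- def get_binary_for_8_bits(number_of_active_bits):
--     count = max(0, min(8, number_of_active_bits))
--     return "0b" + "1" * count + "0" * (8 - count)
-- ===== Notes on version B (the rewrite author's own statement) =====
-- stated objective: simpler
-- what changed: Replaces the per-bit loop with a count clamped to [0,8] and two string multiplications.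
import Mathlib
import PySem

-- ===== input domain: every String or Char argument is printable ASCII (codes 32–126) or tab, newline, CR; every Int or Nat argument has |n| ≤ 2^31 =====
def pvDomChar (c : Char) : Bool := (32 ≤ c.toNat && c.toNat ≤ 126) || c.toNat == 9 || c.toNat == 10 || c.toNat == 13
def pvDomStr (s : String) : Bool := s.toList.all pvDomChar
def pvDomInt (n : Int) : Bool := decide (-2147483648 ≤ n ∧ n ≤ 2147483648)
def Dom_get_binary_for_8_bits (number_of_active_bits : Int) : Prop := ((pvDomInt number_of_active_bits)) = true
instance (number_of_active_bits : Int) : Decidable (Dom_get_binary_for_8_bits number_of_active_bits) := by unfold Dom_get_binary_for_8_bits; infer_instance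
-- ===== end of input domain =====

-- B replaces A's 8-iteration loop with a clamped count and two repetitions (objective: simpler).


-- ===== PORT A =====
-- loop over range(0,8), appending '1' while i < number_of_active_bits, else '0'
def get_binary_for_8_bits (number_of_active_bits : Int) : String :=
  String.ofList ((PySem.List.pyRange 0 8 1).foldl
    (fun binary i => binary ++ (if i < number_of_active_bits then ['1'] else ['0']))
    "0b".toList)

-- ===== PORT B =====
-- clamp the count to [0,8]; "1"*count + "0"*(8-count)
def get_binary_for_8_bits_alt (number_of_active_bits : Int) : String :=
  let count : Int := max 0 (min 8 number_of_active_bits)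
  String.ofList ("0b".toList ++ List.replicate count.toNat '1' ++ List.replicate (8 - count).toNat '0')

-- ===== PRECONDITION & SPEC =====
def Spec_get_binary_for_8_bits (number_of_active_bits : Int) (out : String) : Prop := out = get_binary_for_8_bits_alt number_of_active_bits
instance (number_of_active_bits : Int) (out : String) : Decidable (Spec_get_binary_for_8_bits number_of_active_bits out) := by unfold Spec_get_binary_for_8_bits; infer_instance

-- ===== CLAIM =====
def Claim_equal_get_binary_for_8_bits : Prop := ∀ (number_of_active_bits : Int), Dom_get_binary_for_8_bits number_of_active_bits → Spec_get_binary_for_8_bits number_of_active_bits (get_binary_for_8_bits number_of_active_bits)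

-- ===== LEMMAS AND PROOFS =====

-- Both ports depend on n only through its clamp to [0,8].
lemma pyRange8 : PySem.List.pyRange 0 8 1 = [0,1,2,3,4,5,6,7] := by decide

lemma portA_clamp (n : Int) :
    get_binary_for_8_bits n = get_binary_for_8_bits (max 0 (min 8 n)) := by
  unfold get_binary_for_8_bits
  rw [pyRange8]
  have e : ∀ i : Int, 0 ≤ i → i < 8 → ((i < n) = (i < max 0 (min 8 n))) :=
    fun i h1 h2 => propext (by omega)
  simp only [List.foldl,
    e 0 (by norm_num) (by norm_num), e 1 (by norm_num) (by norm_num),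
    e 2 (by norm_num) (by norm_num), e 3 (by norm_num) (by norm_num),
    e 4 (by norm_num) (by norm_num), e 5 (by norm_num) (by norm_num),
    e 6 (by norm_num) (by norm_num), e 7 (by norm_num) (by norm_num)]

lemma portB_clamp (n : Int) :
    get_binary_for_8_bits_alt n = get_binary_for_8_bits_alt (max 0 (min 8 n)) := by
  unfold get_binary_for_8_bits_alt
  have h : max 0 (min 8 (max 0 (min 8 n))) = max 0 (min 8 n) := by omega
  rw [h]

-- ===== VERDICT =====
theorem get_binary_for_8_bits_spec : Claim_equal_get_binary_for_8_bits := by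
  intro n _
  show get_binary_for_8_bits n = get_binary_for_8_bits_alt n
  rw [portA_clamp, portB_clamp]
  have h1 : 0 ≤ max 0 (min 8 n) := by omega
  have h2 : max 0 (min 8 n) ≤ 8 := by omega
  revert h1 h2
  generalize max 0 (min 8 n) = m
  intro h1 h2
  interval_cases m <;> decide
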